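-- pv_equiv track=rewrite | github.com/kafein-technology/KAI-Flow | backend/app/nodes/agents/react_agent.py | _build_compact_system_prompt
-- ===== SOURCE A (Python) =====
-- def _build_compact_system_prompt(custom_instructions: str, has_tools: bool) -> str:
--     """Build a compact system prompt.
--
--     - No multilingual enforcement/detection.
--     - No `User Input:` injection (user input is always a HumanMessage).
--     - Escapes single { } to avoid template conflicts.
--     """
--     def escape_braces(text: str) -> str:
--         if not text:
--             return text
--         result = []
--         i = 0
--         while i < len(text):
--             if text[i:i + 2] == "{{":
--                 result.append(text[i:i + 2])
--                 i += 2
--             elif text[i:i + 2] == "}}":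
--                 result.append(text[i:i + 2])
--                 i += 2
--             elif text[i] == "{":
--                 result.append("{{")
--                 i += 1
--             elif text[i] == "}":
--                 result.append("}}")
--                 i += 1
--             else:
--                 result.append(text[i])
--                 i += 1
--         return "".join(result)
--
--     custom_instructions = escape_braces(custom_instructions)
--     header = "You are an agent running inside KAI-Fusion."
--     tool_rule = (
--         "Use tools when needed. If no tools are available, answer directly."
--         if has_tools
--         else "Answer directly (no tools connected)."
--     )
--
--     return f"{header}\n{tool_rule}\n\n{custom_instructions}".strip()
-- ===== SOURCE B (Python) =====
-- def _build_compact_system_prompt(custom_instructions: str, has_tools: bool) -> str: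
--     # State-machine escaping: carry at most one pending brace; a pending brace is
--     # closed as a pair by an equal brace, otherwise it is doubled on its own.
--     def escape_braces(text: str) -> str:
--         if not text:
--             return text
--         out = []
--         pending = None  # a '{' or '}' waiting for a partner
--         for c in text:
--             if pending is not None:
--                 if c == pending:
--                     out.append(pending + c)
--                     pending = None
--                     continue
--                 out.append(pending * 2)
--                 pending = None
--             if c in "{}":
--                 pending = c
--             else:
--                 out.append(c)
--         if pending is not None:
--             out.append(pending * 2)
--         return "".join(out)
--
--     header = "You are an agent running inside KAI-Fusion."
--     tool_rule = (
--         "Use tools when needed. If no tools are available, answer directly."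
--         if has_tools
--         else "Answer directly (no tools connected)."
--     )
--     return f"{header}\n{tool_rule}\n\n{escape_braces(custom_instructions)}".strip()
-- ===== Notes on version B (the rewrite author's own statement) =====
-- stated objective: simpler
-- what changed: Replaces the index/slice while-loop in escape_braces (two-character lookahead via text[i:i+2] slicing) with a single for-loop over characters carrying one 'pending brace' state, pairing equal adjacent braces and doubling an unpartnered one.
import Mathlib
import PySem

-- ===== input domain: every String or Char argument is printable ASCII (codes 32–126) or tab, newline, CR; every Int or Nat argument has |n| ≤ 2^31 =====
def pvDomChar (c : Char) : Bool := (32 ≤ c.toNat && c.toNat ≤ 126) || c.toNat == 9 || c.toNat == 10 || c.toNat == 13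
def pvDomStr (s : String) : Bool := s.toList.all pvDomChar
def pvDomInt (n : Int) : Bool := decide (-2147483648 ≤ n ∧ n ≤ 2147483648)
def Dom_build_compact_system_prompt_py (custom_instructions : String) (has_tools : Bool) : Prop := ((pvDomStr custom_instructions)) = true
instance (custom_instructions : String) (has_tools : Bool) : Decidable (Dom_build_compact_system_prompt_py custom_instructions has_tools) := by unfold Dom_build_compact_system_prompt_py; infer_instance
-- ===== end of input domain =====

-- B replaces A's index/slice while-loop in escape_braces by a one-pass fold carrying a pending brace (objective: simpler).

-- ===== PORT A =====
-- A's while-loop over index i with two-character lookahead text[i:i+2]; the branches are in A's order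
-- (text[i:i+2] == "{{" ⟺ the remaining characters start with '{','{').
def pvEscA : List Char → List Char
  | [] => []
  | '{' :: '{' :: rest => '{' :: '{' :: pvEscA rest
  | '}' :: '}' :: rest => '}' :: '}' :: pvEscA rest
  | '{' :: rest => '{' :: '{' :: pvEscA rest
  | '}' :: rest => '}' :: '}' :: pvEscA rest
  | c :: rest => c :: pvEscA rest

def build_compact_system_prompt_py (custom_instructions : String) (has_tools : Bool) : String :=
  -- escape_braces with its `if not text: return text` guard
  let escaped : List Char :=
    if custom_instructions.toList = [] then custom_instructions.toList
    else pvEscA custom_instructions.toList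
  let header := "You are an agent running inside KAI-Fusion."
  let tool_rule :=
    if has_tools then "Use tools when needed. If no tools are available, answer directly."
    else "Answer directly (no tools connected)."
  String.mk (PySem.Chars.strip (header.toList ++ '\n' :: tool_rule.toList ++ '\n' :: '\n' :: escaped))

-- ===== PORT B =====
-- B's single for-loop carrying the pending brace (none = no brace waiting).
def pvEscB : Option Char → List Char → List Char
  | none, [] => []
  | some p, [] => [p, p]
  | none, c :: rest => if c = '{' ∨ c = '}' then pvEscB (some c) rest else c :: pvEscB none rest
  | some p, c :: rest =>
      if c = p then p :: c :: pvEscB none rest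
      else p :: p :: (if c = '{' ∨ c = '}' then pvEscB (some c) rest else c :: pvEscB none rest)

def build_compact_system_prompt_py_alt (custom_instructions : String) (has_tools : Bool) : String :=
  let escaped : List Char :=
    if custom_instructions.toList = [] then custom_instructions.toList
    else pvEscB none custom_instructions.toList
  let header := "You are an agent running inside KAI-Fusion."
  let tool_rule :=
    if has_tools then "Use tools when needed. If no tools are available, answer directly."
    else "Answer directly (no tools connected)."
  String.mk (PySem.Chars.strip (header.toList ++ '\n' :: tool_rule.toList ++ '\n' :: '\n' :: escaped))

-- ===== PRECONDITION & SPEC =====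
def Spec_build_compact_system_prompt_py (custom_instructions : String) (has_tools : Bool) (out : String) : Prop := out = build_compact_system_prompt_py_alt custom_instructions has_tools
instance (custom_instructions : String) (has_tools : Bool) (out : String) : Decidable (Spec_build_compact_system_prompt_py custom_instructions has_tools out) := by unfold Spec_build_compact_system_prompt_py; infer_instance

-- ===== CLAIM (what is proved, stated in full; the proofs are below) =====
def Claim_equal_build_compact_system_prompt_py : Prop := ∀ (custom_instructions : String) (has_tools : Bool), Dom_build_compact_system_prompt_py custom_instructions has_tools → Spec_build_compact_system_prompt_py custom_instructions has_tools (build_compact_system_prompt_py custom_instructions has_tools)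

-- ===== LEMMAS AND PROOFS =====

-- An unpartnered pending brace (the next character, if any, differs) is doubled by B's machine.
lemma pvEscB_pending (p : Char) (rest : List Char) (h : ∀ c r, rest = c :: r → c ≠ p) :
    pvEscB (some p) rest = p :: p :: pvEscB none rest := by
  cases rest with
  | nil => rfl
  | cons c r =>
    have hc : c ≠ p := h c r rfl
    simp [pvEscB, hc]

lemma pvEsc_eq : ∀ cs : List Char, pvEscA cs = pvEscB none cs := by
  intro cs
  induction cs using pvEscA.induct with
  | case1 => rfl
  | case2 rest ih => simpa [pvEscA, pvEscB] using ih
  | case3 rest ih => simpa [pvEscA, pvEscB] using ih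
  | case4 rest h ih =>
      have hp : ∀ c r, rest = c :: r → c ≠ '{' := fun c r hr hc => absurd (hc ▸ hr) (fun he => h r he)
      have hA : pvEscA ('{' :: rest) = '{' :: '{' :: pvEscA rest := by
        rw [pvEscA]
        exact h
      rw [hA, show pvEscB none ('{' :: rest) = pvEscB (some '{') rest by simp [pvEscB],
        pvEscB_pending '{' rest hp, ih]
  | case5 rest h ih =>
      have hp : ∀ c r, rest = c :: r → c ≠ '}' := fun c r hr hc => absurd (hc ▸ hr) (fun he => h r he)
      have hA : pvEscA ('}' :: rest) = '}' :: '}' :: pvEscA rest := by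
        rw [pvEscA]
        exact h
      rw [hA, show pvEscB none ('}' :: rest) = pvEscB (some '}') rest by simp [pvEscB],
        pvEscB_pending '}' rest hp, ih]
  | case6 c rest hcc hdd hne1 hne2 ih =>
      have hA : pvEscA (c :: rest) = c :: pvEscA rest := by
        rw [pvEscA]
        exacts [hcc, hdd, hne1, hne2]
      have hB : pvEscB none (c :: rest) = c :: pvEscB none rest := by
        rw [pvEscB, if_neg]
        rintro (h | h)
        exacts [hne1 h, hne2 h]
      rw [hA, ih, hB]

-- ===== VERDICT (by name: the statement is the Claim_ definition above) =====
theorem build_compact_system_prompt_py_spec : Claim_equal_build_compact_system_prompt_py := by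
  intro ci ht _
  unfold Spec_build_compact_system_prompt_py build_compact_system_prompt_py build_compact_system_prompt_py_alt
  by_cases h : ci.toList = [] <;> simp [h, pvEsc_eq]
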